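-- pv_equiv track=rewrite | github.com/highly-anu/training | src/scheduler.py | _session_compatible
-- ===== SOURCE A (Python) =====
-- def _session_compatible(day: int, new_mod: str, mod_data: dict,
--                         schedule: dict, modalities: dict) -> bool:
--     """Return True if new_mod can share a day with already-assigned modalities."""
--     existing = schedule.get(day, [])
--     if not existing:
--         return True
--     incompatible_with_new = set(mod_data.get('incompatible_in_session_with', []))
--     for ex_mod in existing:
--         if ex_mod in incompatible_with_new:
--             return False
--         ex_incompatible = set(modalities.get(ex_mod, {}).get('incompatible_in_session_with', []))
--         if new_mod in ex_incompatible: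
--             return False
--     return True
-- ===== SOURCE B (Python) =====
-- def _session_compatible(day: int, new_mod: str, mod_data: dict,
--                         schedule: dict, modalities: dict) -> bool:
--     """Build the full set of modalities conflicting with new_mod (its own
--     incompatibility list plus a reverse scan over the whole modalities table),
--     then intersect once with the day's schedule."""
--     conflicts = set(mod_data.get('incompatible_in_session_with', []))
--     for m, d in modalities.items():
--         if new_mod in d.get('incompatible_in_session_with', []):
--             conflicts.add(m)
--     return not (conflicts & set(schedule.get(day, [])))
-- ===== Notes on version B (the rewrite author's own statement) =====
-- stated objective: alternative
-- what changed: B never loops over the day's existing modalities: it builds a reverse conflict index by scanning the whole modalities table once (collecting every modality incompatible with new_mod in either direction) and decides with a single set intersection against the schedule; Pre_ only excludes association lists with duplicate modality keys, which no Python dict can produce, because there B's scan would see shadowed entries that A's first-match lookup never consults.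
import Mathlib
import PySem

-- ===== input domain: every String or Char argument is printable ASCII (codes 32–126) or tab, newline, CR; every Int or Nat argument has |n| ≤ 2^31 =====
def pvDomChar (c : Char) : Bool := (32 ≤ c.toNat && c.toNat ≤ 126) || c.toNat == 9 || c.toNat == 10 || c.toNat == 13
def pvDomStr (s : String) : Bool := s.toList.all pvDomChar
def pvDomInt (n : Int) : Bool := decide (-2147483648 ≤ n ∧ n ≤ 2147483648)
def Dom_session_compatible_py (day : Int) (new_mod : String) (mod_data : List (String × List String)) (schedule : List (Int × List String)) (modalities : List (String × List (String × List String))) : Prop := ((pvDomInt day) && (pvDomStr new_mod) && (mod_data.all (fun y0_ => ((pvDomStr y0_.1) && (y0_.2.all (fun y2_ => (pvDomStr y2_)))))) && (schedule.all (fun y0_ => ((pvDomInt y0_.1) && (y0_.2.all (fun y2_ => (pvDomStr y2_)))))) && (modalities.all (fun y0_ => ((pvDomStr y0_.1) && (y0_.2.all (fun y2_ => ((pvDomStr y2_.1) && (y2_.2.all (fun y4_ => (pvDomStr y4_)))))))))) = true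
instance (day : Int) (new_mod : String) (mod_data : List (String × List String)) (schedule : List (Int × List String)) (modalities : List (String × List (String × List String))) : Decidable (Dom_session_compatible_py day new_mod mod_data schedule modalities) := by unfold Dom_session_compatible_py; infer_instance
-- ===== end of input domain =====

-- B replaces A's per-existing-modality scan with a reverse conflict index built by one pass over the whole modalities table, decided by a single set intersection (objective: alternative).
-- ===== PORT A =====
-- the inner for-loop of A, with its two early returns
def aLoop (new_mod : String) (incompatible_with_new : PySem.Set String)
    (modalities : List (String × List (String × List String))) : List String → Bool
  | [] => true
  | ex_mod :: rest =>
    if PySem.Set.contains incompatible_with_new ex_mod then false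
    else
      let ex_incompatible := PySem.Set.ofList
        ((PySem.Dict.mk ((PySem.Dict.mk modalities).getD ex_mod [])).getD "incompatible_in_session_with" [])
      if PySem.Set.contains ex_incompatible new_mod then false
      else aLoop new_mod incompatible_with_new modalities rest

def session_compatible_py (day : Int) (new_mod : String) (mod_data : List (String × List String)) (schedule : List (Int × List String)) (modalities : List (String × List (String × List String))) : Bool :=
  let existing := (PySem.Dict.mk schedule).getD day []
  if existing.isEmpty then true
  else
    let incompatible_with_new := PySem.Set.ofList ((PySem.Dict.mk mod_data).getD "incompatible_in_session_with" [])
    aLoop new_mod incompatible_with_new modalities existing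

-- ===== PORT B =====
def session_compatible_py_alt (day : Int) (new_mod : String) (mod_data : List (String × List String)) (schedule : List (Int × List String)) (modalities : List (String × List (String × List String))) : Bool :=
  let conflicts0 := PySem.Set.ofList ((PySem.Dict.mk mod_data).getD "incompatible_in_session_with" [])
  let conflicts := modalities.foldl (fun s p =>
      if ((PySem.Dict.mk p.2).getD "incompatible_in_session_with" []).contains new_mod
      then PySem.Set.add s p.1 else s) conflicts0
  (PySem.Set.inter conflicts (PySem.Set.ofList ((PySem.Dict.mk schedule).getD day []))).isEmpty

-- ===== PRECONDITION & SPEC =====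
-- Pre_ excludes association lists whose modality keys repeat — no Python dict can produce them;
-- on such lists B's table scan would see shadowed entries that A's first-match lookup never consults.
def Pre_session_compatible_py (day : Int) (new_mod : String) (mod_data : List (String × List String)) (schedule : List (Int × List String)) (modalities : List (String × List (String × List String))) : Prop :=
  (modalities.map Prod.fst).Nodup
instance (day : Int) (new_mod : String) (mod_data : List (String × List String)) (schedule : List (Int × List String)) (modalities : List (String × List (String × List String))) : Decidable (Pre_session_compatible_py day new_mod mod_data schedule modalities) := by unfold Pre_session_compatible_py; infer_instance
def pvWitness_session_compatible_py : Int × String × (List (String × List String)) × (List (Int × List String)) × (List (String × List (String × List String))) :=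
  (1, "mri", [("incompatible_in_session_with", ["ct"])], [(1, ["ct", "us"])], [("ct", [("incompatible_in_session_with", ["mri"])]), ("us", [])])

def Spec_session_compatible_py (day : Int) (new_mod : String) (mod_data : List (String × List String)) (schedule : List (Int × List String)) (modalities : List (String × List (String × List String))) (out : Bool) : Prop := out = session_compatible_py_alt day new_mod mod_data schedule modalities
instance (day : Int) (new_mod : String) (mod_data : List (String × List String)) (schedule : List (Int × List String)) (modalities : List (String × List (String × List String))) (out : Bool) : Decidable (Spec_session_compatible_py day new_mod mod_data schedule modalities out) := by unfold Spec_session_compatible_py; infer_instance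

-- ===== CLAIM (what is proved, stated in full; the proofs are below) =====
def Claim_equal_session_compatible_py : Prop := ∀ (day : Int) (new_mod : String) (mod_data : List (String × List String)) (schedule : List (Int × List String)) (modalities : List (String × List (String × List String))), Dom_session_compatible_py day new_mod mod_data schedule modalities → Pre_session_compatible_py day new_mod mod_data schedule modalities → Spec_session_compatible_py day new_mod mod_data schedule modalities (session_compatible_py day new_mod mod_data schedule modalities)

-- ===== LEMMAS AND PROOFS =====
-- abbreviation used only in the proofs: the incompatibility list recorded for modality m
def incOf (modalities : List (String × List (String × List String))) (m : String) : List String :=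
  (PySem.Dict.mk ((PySem.Dict.mk modalities).getD m [])).getD "incompatible_in_session_with" []

lemma mem_contains {s : List String} {y : String} :
    PySem.Set.contains s y = true ↔ y ∈ s := by
  simp [PySem.Set.contains_eq_listContains]

lemma contains_ofList (xs : List String) (y : String) :
    PySem.Set.contains (PySem.Set.ofList xs) y = xs.contains y := by
  simp only [PySem.Set.contains_eq_listContains]
  by_cases h : y ∈ xs <;> simp [PySem.Set.mem_ofList, h]

lemma all_ext (l : List String) (f g : String → Bool) (h : ∀ x ∈ l, f x = g x) :
    l.all f = l.all g := by
  induction l with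
  | nil => rfl
  | cons x xs ih =>
    simp only [List.all_cons, h x (List.mem_cons_self), ih (fun y hy => h y (List.mem_cons_of_mem _ hy))]

-- A's loop answers: every existing modality avoids both directions of conflict
lemma aLoop_eq (new_mod : String) (inc : PySem.Set String)
    (modalities : List (String × List (String × List String))) (l : List String) :
    aLoop new_mod inc modalities l =
      l.all (fun ex => !(PySem.Set.contains inc ex) && !((incOf modalities ex).contains new_mod)) := by
  induction l with
  | nil => rfl
  | cons x xs ih =>
    simp only [aLoop, List.all_cons, ih, contains_ofList, incOf]
    cases hc1 : PySem.Set.contains inc x <;>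
      cases hc2 : ((PySem.Dict.mk ((PySem.Dict.mk modalities).getD x [])).getD "incompatible_in_session_with" []).contains new_mod <;>
      simp

-- membership in B's accumulated conflict set
lemma mem_conflicts (new_mod : String) (modalities : List (String × List (String × List String)))
    (s : PySem.Set String) (y : String) :
    y ∈ modalities.foldl (fun s p =>
        if ((PySem.Dict.mk p.2).getD "incompatible_in_session_with" []).contains new_mod
        then PySem.Set.add s p.1 else s) s ↔
      y ∈ s ∨ ∃ p ∈ modalities, p.1 = y ∧
        ((PySem.Dict.mk p.2).getD "incompatible_in_session_with" []).contains new_mod := by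
  induction modalities generalizing s with
  | nil => simp
  | cons q qs ih =>
    simp only [List.foldl_cons, List.mem_cons]
    rw [ih]
    split_ifs with h
    · rw [PySem.Set.mem_add]
      constructor
      · rintro ((hy | hy) | hy)
        · exact Or.inl hy
        · exact Or.inr ⟨q, Or.inl rfl, hy.symm, h⟩
        · obtain ⟨p, hp, h1, h2⟩ := hy; exact Or.inr ⟨p, Or.inr hp, h1, h2⟩
      · rintro (hy | ⟨p, (rfl | hp), h1, h2⟩)
        · exact Or.inl (Or.inl hy)
        · exact Or.inl (Or.inr h1.symm)
        · exact Or.inr ⟨p, hp, h1, h2⟩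
    · constructor
      · rintro (hy | ⟨p, hp, h1, h2⟩)
        · exact Or.inl hy
        · exact Or.inr ⟨p, Or.inr hp, h1, h2⟩
      · rintro (hy | ⟨p, (rfl | hp), h1, h2⟩)
        · exact Or.inl hy
        · exact absurd h2 (by simpa using h)
        · exact Or.inr ⟨p, hp, h1, h2⟩

-- under unique keys, the reverse scan finds exactly what the per-key lookup finds
lemma reverse_lookup (new_mod ex : String) (modalities : List (String × List (String × List String)))
    (hnd : (modalities.map Prod.fst).Nodup) :
    (∃ p ∈ modalities, p.1 = ex ∧
        ((PySem.Dict.mk p.2).getD "incompatible_in_session_with" []).contains new_mod) ↔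
      ((incOf modalities ex).contains new_mod : Bool) = true := by
  unfold incOf
  constructor
  · rintro ⟨⟨k, v⟩, hp, rfl, h2⟩
    have hget : (PySem.Dict.mk modalities).get? k = some v := by
      apply PySem.Dict.get?_of_mem_items (d := PySem.Dict.mk modalities)
      · simpa [PySem.Dict.items] using hp
      · simpa [PySem.Dict.keys, PySem.Dict.items] using hnd
    have hD : (PySem.Dict.mk modalities).getD k [] = v :=
      PySem.Dict.getD_of_get?_eq_some _ [] hget
    simpa [hD] using h2
  · intro h
    rcases hget : (PySem.Dict.mk modalities).get? ex with _ | v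
    · have hD : (PySem.Dict.mk modalities).getD ex [] = [] :=
        PySem.Dict.getD_of_get?_eq_none _ [] hget
      rw [hD] at h
      rw [show (PySem.Dict.mk ([] : List (String × List String))).getD "incompatible_in_session_with" [] = [] from rfl] at h
      simp at h
    · have hD : (PySem.Dict.mk modalities).getD ex [] = v :=
        PySem.Dict.getD_of_get?_eq_some _ [] hget
      refine ⟨(ex, v), ?_, rfl, ?_⟩
      · have := PySem.Dict.mem_items_of_get?_eq_some (d := PySem.Dict.mk modalities) hget
        simpa [PySem.Dict.items] using this
      · rwa [hD] at h

lemma inter_isEmpty (s : PySem.Set String) (l : List String) :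
    (PySem.Set.inter s (PySem.Set.ofList l)).isEmpty =
      l.all (fun ex => !(PySem.Set.contains s ex)) := by
  have hmem : ∀ x, x ∈ PySem.Set.inter s (PySem.Set.ofList l) ↔ x ∈ s ∧ x ∈ l := by
    intro x; rw [PySem.Set.mem_inter, PySem.Set.mem_ofList]
  have key : (PySem.Set.inter s (PySem.Set.ofList l)).isEmpty = true ↔ ∀ x ∈ l, x ∉ s := by
    rw [List.isEmpty_iff, List.eq_nil_iff_forall_not_mem]
    constructor
    · intro hn x hxl hxs; exact hn x ((hmem x).mpr ⟨hxs, hxl⟩)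
    · intro hforall x hx
      have h2 := (hmem x).mp hx
      exact hforall x h2.2 h2.1
  have key2 : (l.all (fun ex => !(PySem.Set.contains s ex))) = true ↔ ∀ x ∈ l, x ∉ s := by
    simp [List.all_eq_true]
  cases hb : l.all (fun ex => !(PySem.Set.contains s ex)) with
  | true => exact key.mpr (key2.mp hb)
  | false =>
    rw [Bool.eq_false_iff]
    intro ht
    rw [← key2] at key
    rw [key.mp ht] at hb
    exact Bool.true_eq_false.mp hb

-- pointwise: "ex is in B's conflict set" = "ex conflicts with new_mod in either direction"
lemma contains_conflicts (new_mod : String) (modalities : List (String × List (String × List String)))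
    (inc : PySem.Set String) (ex : String)
    (hnd : (modalities.map Prod.fst).Nodup) :
    PySem.Set.contains (modalities.foldl (fun s p =>
        if ((PySem.Dict.mk p.2).getD "incompatible_in_session_with" []).contains new_mod
        then PySem.Set.add s p.1 else s) inc) ex =
      (PySem.Set.contains inc ex || (incOf modalities ex).contains new_mod) := by
  rw [Bool.eq_iff_iff, Bool.or_eq_true, mem_contains, mem_contains,
    mem_conflicts, reverse_lookup new_mod ex modalities hnd]

-- ===== VERDICT (by name: the statement is the Claim_ definition above) =====
theorem session_compatible_py_spec : Claim_equal_session_compatible_py := by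
  intro day new_mod mod_data schedule modalities _ hpre
  unfold Spec_session_compatible_py
  show session_compatible_py day new_mod mod_data schedule modalities =
    session_compatible_py_alt day new_mod mod_data schedule modalities
  simp only [session_compatible_py, session_compatible_py_alt]
  rw [inter_isEmpty]
  rcases hE : (PySem.Dict.mk schedule).getD day [] with _ | ⟨x, xs⟩
  · simp
  · simp only [List.isEmpty_cons, Bool.false_eq_true, if_false]
    rw [aLoop_eq]
    refine (all_ext _ _ _ ?_).symm
    intro ex _
    rw [contains_conflicts new_mod modalities _ ex hpre, Bool.not_or]
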